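-- pv_equiv track=rewrite | github.com/Chadillac12/db | reorganize_hierarchical.py | parse_section_number
-- ===== SOURCE A (Python) =====
-- from typing import Optional, Tuple
--
-- def parse_section_number(section: str) -> Optional[list[str]]:
--     """Parse a section number into its hierarchical components.
--
--     Args:
--         section: Section number string like "4.1.2" or "4.1.2-1"
--
--     Returns:
--         List of section components ["4", "4.1", "4.1.2"] or None if invalid
--
--     Examples:
--         "4.1.2" -> ["4", "4.1", "4.1.2"]
--         "1.2.3-5" -> ["1", "1.2", "1.2.3"]  (ignores suffix after dash)
--         "5" -> ["5"]
--         "" -> None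
--     """
--     if not section:
--         return None
--
--     # Remove suffix after dash (e.g., "4.1.2-1" -> "4.1.2")
--     section_base = section.split('-')[0].strip()
--     if not section_base:
--         return None
--
--     # Split by period
--     parts = section_base.split('.')
--
--     # Build hierarchical path components
--     components = []
--     for i in range(len(parts)):
--         components.append('.'.join(parts[:i+1]))
--
--     return components
-- ===== SOURCE B (Python) =====
-- from typing import Optional
--
-- def parse_section_number(section: str) -> Optional[list]:
--     if not section:
--         return None
--     section_base = section.split('-')[0].strip()
--     if not section_base:
--         return None
--     parts = section_base.split('.')
--     # Thread a single running prefix instead of re-slicing and re-joining each time.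
--     components = []
--     prefix = ""
--     for part in parts:
--         prefix = part if not components else prefix + "." + part
--         components.append(prefix)
--     return components
-- ===== Notes on version B (the rewrite author's own statement) =====
-- stated objective: alternative
-- what changed: Replaces the per-index loop that re-slices the parts list and re-joins each prefix from scratch with a single pass threading one running prefix string that is extended by one part and appended each step.
import Mathlib
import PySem

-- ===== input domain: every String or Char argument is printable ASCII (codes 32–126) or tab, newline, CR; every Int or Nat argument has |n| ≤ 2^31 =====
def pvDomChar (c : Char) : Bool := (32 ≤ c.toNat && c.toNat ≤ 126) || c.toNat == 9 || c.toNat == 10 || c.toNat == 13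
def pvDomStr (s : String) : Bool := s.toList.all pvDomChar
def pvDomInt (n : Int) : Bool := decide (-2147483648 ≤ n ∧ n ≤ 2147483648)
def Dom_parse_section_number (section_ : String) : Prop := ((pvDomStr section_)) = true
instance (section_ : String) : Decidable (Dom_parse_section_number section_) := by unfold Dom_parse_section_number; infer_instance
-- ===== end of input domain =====

-- B builds the cumulative dotted prefixes by threading one running prefix string in a
-- single pass instead of re-slicing and re-joining parts[:i+1] for every index i.

-- ===== PORT A =====
-- `section.split('-')[0]`: sep "-" is nonempty so split? returns some, and Python's
-- split always yields at least one piece, so the [0] never raises; getD/headD are exact here.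
def parse_section_number (section_ : String) : Option (List String) :=
  if section_ = "" then none
  else
    let section_base := PySem.Str.strip (((PySem.Str.split? section_ "-").getD []).headD "")
    if section_base = "" then none
    else
      let parts := (PySem.Str.split? section_base ".").getD []
      let components :=
        (PySem.List.pyRange 0 (parts.length : Int) 1).foldl
          (fun acc i => acc ++ [PySem.Str.join "." (PySem.List.slice parts none (some (i + 1)))]) []
      some components

-- ===== PORT B =====
def parse_section_number_alt (section_ : String) : Option (List String) :=
  if section_ = "" then none
  else
    let section_base := PySem.Str.strip (((PySem.Str.split? section_ "-").getD []).headD "")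
    if section_base = "" then none
    else
      let parts := (PySem.Str.split? section_base ".").getD []
      let st := parts.foldl
        (fun (st : String × List String) part =>
          let prefix_ := if st.2 = [] then part else st.1 ++ "." ++ part
          (prefix_, st.2 ++ [prefix_])) ("", [])
      some st.2

-- ===== PRECONDITION & SPEC =====
def Spec_parse_section_number (section_ : String) (out : Option (List String)) : Prop := out = parse_section_number_alt section_
instance (section_ : String) (out : Option (List String)) : Decidable (Spec_parse_section_number section_ out) := by unfold Spec_parse_section_number; infer_instance

-- ===== CLAIM (what is proved, stated in full; the proofs are below) =====
def Claim_equal_parse_section_number : Prop := ∀ (section_ : String), Dom_parse_section_number section_ → Spec_parse_section_number section_ (parse_section_number section_)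

-- ===== LEMMAS AND PROOFS =====

theorem strJoin_singleton (sep a : String) : PySem.Str.join sep [a] = a := by
  apply String.toList_inj.mp
  simp [PySem.Str.toList_join, PySem.Chars.join_singleton]

theorem strJoin_cons_cons (sep a b : String) (l : List String) :
    PySem.Str.join sep (a :: b :: l) = a ++ sep ++ PySem.Str.join sep (b :: l) := by
  apply String.toList_inj.mp
  simp [PySem.Str.toList_join, PySem.Chars.join_cons_cons]

theorem foldl_append_singleton {α β : Type} (f : α → β) :
    ∀ (l : List α) (acc : List β),
      l.foldl (fun a x => a ++ [f x]) acc = acc ++ l.map f := by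
  intro l
  induction l with
  | nil => simp
  | cons x xs ih => intro acc; simp [List.foldl_cons, ih]

-- A's loop equals mapping "join of take (i+1)" over the indices.
theorem a_loop_eq_map (parts : List String) :
    (PySem.List.pyRange 0 (parts.length : Int) 1).foldl
      (fun acc i => acc ++ [PySem.Str.join "." (PySem.List.slice parts none (some (i + 1)))]) []
    = (List.range parts.length).map
        (fun k => PySem.Str.join "." (parts.take (k + 1))) := by
  rw [PySem.List.pyRange_one, List.foldl_map, foldl_append_singleton]
  simp only [List.nil_append]
  apply List.map_congr_left
  intro k _
  congr 1
  have hb : (0 : Int) ≤ (0 : Int) + (k : Int) + 1 := by omega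
  rw [PySem.List.slice_to parts hb]
  congr 1
  omega

-- B's loop invariant: with a nonempty accumulator, each step extends the running prefix.
theorem b_loop_invariant (rest : List String) :
    ∀ (pre : String) (acc : List String), acc ≠ [] →
      (rest.foldl
        (fun (st : String × List String) part =>
          (if st.2 = [] then part else st.1 ++ "." ++ part,
           st.2 ++ [if st.2 = [] then part else st.1 ++ "." ++ part])) (pre, acc)).2
      = acc ++ (List.range rest.length).map
          (fun k => PySem.Str.join "." (pre :: rest.take (k + 1))) := by
  induction rest with
  | nil => intro pre acc _; simp
  | cons x xs ih =>
    intro pre acc hacc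
    simp only [List.foldl_cons, if_neg hacc]
    rw [ih (pre ++ "." ++ x) (acc ++ [pre ++ "." ++ x]) (by simp)]
    rw [List.length_cons, List.range_succ_eq_map, List.map_cons, List.map_map]
    rw [List.append_assoc, List.singleton_append]
    congr 1
    congr 1
    · rw [zero_add, show List.take 1 (x :: xs) = [x] by simp, strJoin_cons_cons, strJoin_singleton]
    · apply List.map_congr_left
      intro k hk
      simp only [Function.comp_apply, Nat.succ_eq_add_one]
      -- xs.take (k+1) is nonempty because k < xs.length
      rw [List.mem_range] at hk
      obtain ⟨y, ys, hxs⟩ : ∃ y ys, xs = y :: ys := by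
        cases xs with
        | nil => simp at hk
        | cons y ys => exact ⟨y, ys, rfl⟩
      subst hxs
      simp only [List.take_succ_cons]
      rw [strJoin_cons_cons, strJoin_cons_cons, strJoin_cons_cons]
      simp [String.append_assoc]

-- The two loop results coincide for any parts list.
theorem loops_agree (parts : List String) :
    (parts.foldl
      (fun (st : String × List String) part =>
        (if st.2 = [] then part else st.1 ++ "." ++ part,
         st.2 ++ [if st.2 = [] then part else st.1 ++ "." ++ part])) ("", [])).2
    = (PySem.List.pyRange 0 (parts.length : Int) 1).foldl
        (fun acc i => acc ++ [PySem.Str.join "." (PySem.List.slice parts none (some (i + 1)))]) [] := by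
  rw [a_loop_eq_map]
  cases parts with
  | nil => simp
  | cons p rest =>
    simp only [List.foldl_cons, reduceIte, List.nil_append]
    rw [b_loop_invariant rest p [p] (by simp)]
    rw [List.length_cons, List.range_succ_eq_map, List.map_cons, List.map_map]
    simp [strJoin_singleton, Function.comp, List.take_succ_cons]

-- ===== VERDICT (by name: the statement is the Claim_ definition above) =====
theorem parse_section_number_spec : Claim_equal_parse_section_number := by
  intro section_ _
  simp only [Spec_parse_section_number, parse_section_number, parse_section_number_alt]
  split_ifs with h1 h2
  · rfl
  · rfl
  · exact congrArg some (loops_agree _).symm
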